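-- pv_equiv track=rewrite | github.com/piotrsniady/python-exercises-edabit | hard/the_kempner_function.py | kempner
-- ===== SOURCE A (Python) =====
-- from math import factorial
--
-- def kempner(n: int) -> int:
--     value = 1
--     count = 0
--
--     while True:
--         if factorial(value) % n > 0:
--             count += 1
--         value += 1
--
--         if factorial(value) % n == 0:
--             count += 1
--             break
--     return count
-- ===== SOURCE B (Python) =====
-- def _divide_out(t, p):
--     # split t into (a, t') with t == p**a * t' and p not dividing t'
--     a = 0
--     while t % p == 0:
--         a += 1
--         t //= p
--     return a, t
--
--
-- def _s_prime_pow(p, a):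
--     # smallest m with v_p(m!) >= a, scanning multiples of p and
--     # accumulating the exponent incrementally (Legendre)
--     total = 0
--     m = 0
--     while total < a:
--         m += p
--         extra, _ = _divide_out(m, p)
--         total += extra
--     return m
--
--
-- def kempner(n: int) -> int:
--     result = 1
--     d = 2
--     m = n
--     while d * d <= m:
--         if m % d == 0:
--             a, m = _divide_out(m, d)
--             result = max(result, _s_prime_pow(d, a))
--         d += 1
--     if m > 1:
--         result = max(result, _s_prime_pow(m, 1))
--     return result
-- ===== Notes on version B (the rewrite author's own statement) =====
-- stated objective: alternative
-- what changed: Replaces the ascending scan that recomputes factorial(m) mod n for every m by trial-division factorization of n plus, for each prime power p^a, a per-prime Legendre-style search for the least m with v_p(m!) >= a, returning the maximum over prime factors.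
-- outside the precondition, e.g. on kempner(0): A raises ZeroDivisionError, B returns 1
import Mathlib
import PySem

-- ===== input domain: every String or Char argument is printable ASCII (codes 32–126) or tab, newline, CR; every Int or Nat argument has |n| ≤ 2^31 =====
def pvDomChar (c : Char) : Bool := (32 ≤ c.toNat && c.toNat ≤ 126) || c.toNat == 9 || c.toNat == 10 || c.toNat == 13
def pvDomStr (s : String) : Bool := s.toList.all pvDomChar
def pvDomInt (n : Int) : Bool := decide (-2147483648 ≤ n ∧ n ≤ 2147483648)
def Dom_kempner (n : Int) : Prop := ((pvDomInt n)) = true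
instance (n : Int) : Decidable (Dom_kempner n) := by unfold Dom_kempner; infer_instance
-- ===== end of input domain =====

-- B replaces A's ascending scan recomputing factorial(m) % n by trial-division
-- factorization plus a per-prime-power Legendre-style search (objective: alternative algorithm).

-- ===== PORT A =====
-- math.factorial; exact for v ≥ 0 (A's `value` starts at 1 and only increases)
def pyFactorial (v : Int) : Int := ((Nat.factorial v.toNat : Nat) : Int)

-- A's `while True` loop; the fuel is never exhausted on Pre_ (proved below)
def kempnerLoop (n : Int) : Nat → Int → Int → Int
  | 0, _, count => count
  | fuel+1, value, count =>
    let count' := if 0 < PySem.Int.mod (pyFactorial value) n then count + 1 else count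
    let value' := value + 1
    if PySem.Int.mod (pyFactorial value') n = 0 then count' + 1
    else kempnerLoop n fuel value' count'

def kempner (n : Int) : Int := kempnerLoop n 4294967296 1 0

-- ===== PORT B =====
-- Source B's _divide_out: repeatedly divide t by p, counting; fuel t.natAbs suffices
def divideOutLoop (p : Int) : Nat → Int → Int → Int × Int
  | 0, a, t => (a, t)
  | fuel+1, a, t =>
    if PySem.Int.mod t p = 0 then divideOutLoop p fuel (a+1) (PySem.Int.floordiv t p)
    else (a, t)

def divideOut (t p : Int) : Int × Int := divideOutLoop p t.natAbs 0 t

-- Source B's _s_prime_pow: scan multiples of p accumulating v_p; ≤ a iterations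
def sPrimePowLoop (p a : Int) : Nat → Int → Int → Int
  | 0, _, m => m
  | fuel+1, total, m =>
    if total < a then
      sPrimePowLoop p a fuel (total + (divideOut (m + p) p).1) (m + p)
    else m

def sPrimePow (p a : Int) : Int := sPrimePowLoop p a (a.natAbs + 1) 0 0

-- Source B's trial-division loop over d
def factorLoop : Nat → Int → Int → Int → Int
  | 0, _, _, result => result
  | fuel+1, d, m, result =>
    if d * d ≤ m then
      if PySem.Int.mod m d = 0 then
        factorLoop fuel (d+1) (divideOut m d).2 (max result (sPrimePow d (divideOut m d).1))
      else factorLoop fuel (d+1) m result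
    else if 1 < m then max result (sPrimePow m 1) else result

def kempner_alt (n : Int) : Int := factorLoop (n.natAbs + 2) 2 n 1

-- ===== PRECONDITION & SPEC =====
-- Pre_ excludes only n = 0, where A raises ZeroDivisionError (factorial(value) % 0)
def Pre_kempner (n : Int) : Prop := n ≠ 0
instance (n : Int) : Decidable (Pre_kempner n) := by unfold Pre_kempner; infer_instance
def pvWitness_kempner : Int := (6)

def Spec_kempner (n : Int) (out : Int) : Prop := out = kempner_alt n
instance (n : Int) (out : Int) : Decidable (Spec_kempner n out) := by unfold Spec_kempner; infer_instance

-- ===== CLAIM (what is proved, stated in full; the proofs are below) =====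
def Claim_equal_kempner : Prop := ∀ (n : Int), Dom_kempner n → Pre_kempner n → Spec_kempner n (kempner n)

-- ===== LEMMAS AND PROOFS =====

-- L N = the least m ≥ 1 with N ∣ m!  (the Kempner value of N, for N ≥ 1)
lemma lk_exists {N : Nat} (hN : 1 ≤ N) : ∃ m, 0 < m ∧ N ∣ Nat.factorial m :=
  ⟨N, hN, Nat.dvd_factorial hN le_rfl⟩

def Lk (N : Nat) : Nat := if hN : 1 ≤ N then Nat.find (lk_exists hN) else 0

lemma Lk_eq_find {N : Nat} (hN : 1 ≤ N) : Lk N = Nat.find (lk_exists hN) := by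
  simp [Lk, hN]

lemma Lk_pos {N : Nat} (hN : 1 ≤ N) : 0 < Lk N := by
  rw [Lk_eq_find hN]; exact (Nat.find_spec (lk_exists hN)).1

lemma Lk_dvd {N : Nat} (hN : 1 ≤ N) : N ∣ Nat.factorial (Lk N) := by
  rw [Lk_eq_find hN]; exact (Nat.find_spec (lk_exists hN)).2

lemma Lk_min {N k : Nat} (hN : 1 ≤ N) (hk : 0 < k) (h : N ∣ Nat.factorial k) : Lk N ≤ k := by
  rw [Lk_eq_find hN]; exact Nat.find_min' (lk_exists hN) ⟨hk, h⟩

lemma Lk_not_dvd {N k : Nat} (hN : 1 ≤ N) (hk : 0 < k) (h : k < Lk N) : ¬ N ∣ Nat.factorial k := by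
  rw [Lk_eq_find hN] at h
  intro hd
  exact (Nat.find_min (lk_exists hN) h) ⟨hk, hd⟩

lemma Lk_eq_of {N m : Nat} (hN : 1 ≤ N) (hm : 0 < m) (hd : N ∣ Nat.factorial m)
    (hmin : ∀ k, 0 < k → k < m → ¬ N ∣ Nat.factorial k) : Lk N = m := by
  have h1 : Lk N ≤ m := Lk_min hN hm hd
  rcases Nat.lt_or_ge (Lk N) m with h | h
  · exact absurd (Lk_dvd hN) (hmin _ (Lk_pos hN) h)
  · omega

lemma Lk_one : Lk 1 = 1 := by
  exact Lk_eq_of le_rfl one_pos (one_dvd _) (fun k hk hk1 => by omega)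

lemma Lk_le_self {N : Nat} (hN : 1 ≤ N) : Lk N ≤ N :=
  Lk_min hN hN (Nat.dvd_factorial hN le_rfl)

lemma Lk_ge_two {N : Nat} (hN : 2 ≤ N) : 2 ≤ Lk N := by
  have h1 : 0 < Lk N := Lk_pos (by omega)
  rcases Nat.lt_or_ge (Lk N) 2 with h | h
  · have : Lk N = 1 := by omega
    have hd := Lk_dvd (N := N) (by omega)
    rw [this] at hd
    simp [Nat.factorial] at hd
    omega
  · exact h

lemma Lk_mul {x y : Nat} (hx : 1 ≤ x) (hy : 1 ≤ y) (hco : Nat.Coprime x y) :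
    Lk (x * y) = max (Lk x) (Lk y) := by
  have hxy : 1 ≤ x * y := Nat.one_le_iff_ne_zero.mpr (by positivity)
  apply Lk_eq_of hxy (lt_of_lt_of_le (Lk_pos hx) (le_max_left _ _))
  · exact hco.mul_dvd_of_dvd_of_dvd
      ((Lk_dvd hx).trans (Nat.factorial_dvd_factorial (le_max_left _ _)))
      ((Lk_dvd hy).trans (Nat.factorial_dvd_factorial (le_max_right _ _)))
  · intro k hk hklt hd
    have hxd : x ∣ Nat.factorial k := (Dvd.intro y rfl).trans hd
    have hyd : y ∣ Nat.factorial k := (Dvd.intro_left x rfl).trans hd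
    have h1 : Lk x ≤ k := Lk_min hx hk hxd
    have h2 : Lk y ≤ k := Lk_min hy hk hyd
    omega

-- v_P(x!)
def vfac (P x : Nat) : Nat := (Nat.factorial x).factorization P

lemma vfac_zero (P : Nat) : vfac P 0 = 0 := by simp [vfac, Nat.factorial]

lemma vfac_succ (P x : Nat) : vfac P (x+1) = vfac P x + (x+1).factorization P := by
  unfold vfac
  rw [Nat.factorial_succ, Nat.factorization_mul (by omega) (Nat.factorial_ne_zero x)]
  simp [Nat.add_comm]

lemma vfac_const {P x y : Nat} (hxy : x ≤ y) (h : ∀ z, x < z → z ≤ y → ¬ P ∣ z) :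
    vfac P y = vfac P x := by
  induction y with
  | zero => have hx0 : x = 0 := by omega
            subst hx0; rfl
  | succ y ih =>
    rcases Nat.lt_or_ge x (y+1) with hlt | hge
    · have hxy' : x ≤ y := by omega
      rw [vfac_succ, ih hxy' (fun z hz1 hz2 => h z hz1 (by omega)),
        Nat.factorization_eq_zero_of_not_dvd (h (y+1) hlt le_rfl)]
      omega
    · have hx : x = y + 1 := by omega
      subst hx; rfl

lemma fact_dvd_iff_le_vfac {P a x : Nat} (hP : P.Prime) :
    P ^ a ∣ Nat.factorial x ↔ a ≤ vfac P x :=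
  hP.pow_dvd_iff_le_factorization (Nat.factorial_ne_zero x)

lemma factorization_of_split {P k t x : Nat} (hP : P.Prime) (ht : t ≠ 0)
    (h : x = P ^ k * t) (hnd : ¬ P ∣ t) : x.factorization P = k := by
  subst h
  rw [Nat.factorization_mul (pow_ne_zero _ hP.pos.ne') ht, hP.factorization_pow]
  simp [Nat.factorization_eq_zero_of_not_dvd hnd]

lemma divideOutLoop_spec {p : Int} (hp : 2 ≤ p) :
    ∀ (fuel : Nat) (t a : Int), 1 ≤ t → t.natAbs ≤ fuel →
    ∃ (k : Nat) (t' : Int), divideOutLoop p fuel a t = (a + k, t') ∧ 1 ≤ t' ∧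
      t = p ^ k * t' ∧ ¬ (p ∣ t') := by
  intro fuel
  induction fuel with
  | zero => intro t a ht hf; exfalso; omega
  | succ fuel ih =>
    intro t a ht hf
    rw [divideOutLoop]
    by_cases hdvd : p ∣ t
    · rw [if_pos ((PySem.Int.mod_eq_zero_iff_dvd t p).mpr hdvd)]
      have hpos : (0 : Int) < p := by omega
      have ht2e : PySem.Int.floordiv t p = t / p := PySem.Int.floordiv_eq_ediv_of_pos hpos
      have hmul : p * (t / p) = t := Int.mul_ediv_cancel' hdvd
      have h1t2 : 1 ≤ t / p := by nlinarith [hmul]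
      have hlt : t / p < t := Int.ediv_lt_of_lt_mul (by omega) (by nlinarith)
      have hf2 : (t / p).natAbs ≤ fuel := by omega
      obtain ⟨k, t', heq, h1, hsplit, hnd⟩ := ih (t / p) (a + 1) h1t2 hf2
      refine ⟨k + 1, t', ?_, h1, ?_, hnd⟩
      · rw [ht2e, heq]; congr 1; push_cast; ring
      · rw [← hmul, hsplit]; ring
    · rw [if_neg (by rw [PySem.Int.mod_eq_zero_iff_dvd]; exact hdvd)]
      exact ⟨0, t, by simp, ht, by ring, hdvd⟩

lemma divideOut_spec {p t : Int} (hp : 2 ≤ p) (ht : 1 ≤ t) :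
    ∃ (k : Nat) (t' : Int), divideOut t p = ((k : Int), t') ∧ 1 ≤ t' ∧
      t = p ^ k * t' ∧ ¬ (p ∣ t') := by
  obtain ⟨k, t', heq, h1, hs, hnd⟩ := divideOutLoop_spec hp t.natAbs t 0 ht le_rfl
  exact ⟨k, t', by simpa using heq, h1, hs, hnd⟩

lemma sppLoop_spec {p a : Int} (hp2 : 2 ≤ p) (hP : p.toNat.Prime) (ha : 1 ≤ a) :
    ∀ (fuel : Nat) (j : Nat),
      a.toNat - vfac p.toNat (p.toNat * j) + 1 ≤ fuel →
      (∀ y, 0 < y → y < p.toNat * j → vfac p.toNat y < a.toNat) →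
      sPrimePowLoop p a fuel ((vfac p.toNat (p.toNat * j) : Int)) ((p.toNat * j : Nat) : Int)
        = (Lk (p.toNat ^ a.toNat) : Int) := by
  have hptn : ((p.toNat : Int)) = p := Int.toNat_of_nonneg (by omega)
  have hP2 : 2 ≤ p.toNat := by omega
  intro fuel
  induction fuel with
  | zero => intro j hf hlow; omega
  | succ fuel ih =>
    intro j hf hlow
    rw [sPrimePowLoop]
    by_cases hTa : vfac p.toNat (p.toNat * j) < a.toNat
    · rw [if_pos (by omega)]
      have hm' : ((p.toNat * j : Nat) : Int) + p = ((p.toNat * (j+1) : Nat) : Int) := by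
        push_cast [hptn]; ring
      rw [hm']
      have h0 : 1 ≤ p.toNat * (j+1) := Nat.one_le_iff_ne_zero.mpr (by positivity)
      have h1m' : (1 : Int) ≤ ((p.toNat * (j+1) : Nat) : Int) := by exact_mod_cast h0
      obtain ⟨k, t', heq, h1, hsplit, hnd⟩ := divideOut_spec hp2 h1m'
      rw [heq]
      dsimp only
      have ht'n : ((t'.toNat : Nat) : Int) = t' := Int.toNat_of_nonneg (by omega)
      have hsplitN : p.toNat * (j+1) = p.toNat ^ k * t'.toNat := by
        have h2 : ((p.toNat * (j+1) : Nat) : Int) = ((p.toNat ^ k * t'.toNat : Nat) : Int) := by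
          rw [hsplit]; push_cast [hptn, ht'n]; ring
        exact_mod_cast h2
      have hndN : ¬ p.toNat ∣ t'.toNat := by
        intro hd
        exact hnd (by rw [← ht'n, ← hptn]; exact_mod_cast hd)
      have hksp : (p.toNat * (j+1)).factorization p.toNat = k :=
        factorization_of_split hP (by omega) hsplitN hndN
      have hk1 : 1 ≤ k := by
        rcases Nat.eq_zero_or_pos k with h0k | h
        · exfalso
          apply hndN
          rw [h0k, pow_zero, one_mul] at hsplitN
          exact ⟨j + 1, hsplitN.symm⟩
        · exact h
      -- the valuation after this block
      have hstep : vfac p.toNat (p.toNat * (j+1)) = vfac p.toNat (p.toNat * j) + k := by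
        have hsb : p.toNat * (j+1) - 1 + 1 = p.toNat * (j+1) := by omega
        have hv1 := vfac_succ p.toNat (p.toNat * (j+1) - 1)
        rw [hsb, hksp] at hv1
        rw [hv1]
        congr 1
        apply vfac_const (by nlinarith)
        intro z hz1 hz2
        rintro ⟨c, hc⟩
        subst hc
        have : j < c ∧ c < j + 1 := ⟨by nlinarith, by nlinarith⟩
        omega
      have hgoal := ih (j+1) (by omega) ?_
      · rw [← hgoal]
        congr 1
        push_cast [hstep]
        ring
      · intro y hy0 hy
        rcases Nat.lt_or_ge y (p.toNat * j) with h | h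
        · exact hlow y hy0 h
        · have : vfac p.toNat y = vfac p.toNat (p.toNat * j) := by
            apply vfac_const h
            intro z hz1 hz2
            rintro ⟨c, hc⟩
            subst hc
            have : j < c ∧ c < j + 1 := ⟨by nlinarith, by nlinarith⟩
            omega
          omega
    · rw [if_neg (by omega)]
      have hj : 0 < j := by
        by_contra h0j
        have hj0 : j = 0 := by omega
        rw [hj0, Nat.mul_zero, vfac_zero] at hTa
        omega
      have hm0 : 0 < p.toNat * j := by positivity
      have : Lk (p.toNat ^ a.toNat) = p.toNat * j := by
        apply Lk_eq_of (Nat.one_le_iff_ne_zero.mpr (by positivity)) hm0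
        · exact (fact_dvd_iff_le_vfac hP).mpr (by omega)
        · intro k hk0 hklt hd
          have := (fact_dvd_iff_le_vfac hP).mp hd
          have := hlow k hk0 hklt
          omega
      rw [this]

lemma sPrimePow_spec {p a : Int} (hp2 : 2 ≤ p) (hP : p.toNat.Prime) (ha : 1 ≤ a) :
    sPrimePow p a = (Lk (p.toNat ^ a.toNat) : Int) := by
  have h := sppLoop_spec hp2 hP ha (a.natAbs + 1) 0
    (by simp only [Nat.mul_zero, vfac_zero]; omega) (by omega)
  simpa [vfac_zero] using h

lemma factorLoop_spec :
    ∀ (fuel : Nat) (d m result : Int) (C : Nat),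
      2 ≤ d → 1 ≤ m → 1 ≤ C →
      (∀ q, Nat.Prime q → q ∣ m.toNat → d ≤ (q : Int)) →
      (∀ q, Nat.Prime q → q ∣ C → (q : Int) < d) →
      result = (Lk C : Int) →
      m + 2 ≤ d + (fuel : Int) →
      factorLoop fuel d m result = (Lk (C * m.toNat) : Int) := by
  intro fuel
  induction fuel with
  | zero =>
    intro d m result C hd hm hC hfm hfC hres hf
    have hm1 : m = 1 := by
      by_contra hne
      have hm2n : 2 ≤ m.toNat := by omega
      have hq := Nat.minFac_prime (n := m.toNat) (by omega)
      have h1 := hfm _ hq (Nat.minFac_dvd m.toNat)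
      have h2 : m.toNat.minFac ≤ m.toNat := Nat.minFac_le (by omega)
      omega
    subst hm1
    simp [factorLoop, hres]
  | succ fuel ih =>
    intro d m result C hd hm hC hfm hfC hres hf
    rw [factorLoop]
    by_cases hcond : d * d ≤ m
    · rw [if_pos hcond]
      have hdm : d ≤ m := by nlinarith
      by_cases hdvd : d ∣ m
      · rw [if_pos ((PySem.Int.mod_eq_zero_iff_dvd m d).mpr hdvd)]
        obtain ⟨k, t', heq, h1, hsplit, hnd⟩ := divideOut_spec hd hm
        rw [heq]
        dsimp only
        have hdtn : ((d.toNat : Nat) : Int) = d := Int.toNat_of_nonneg (by omega)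
        have hD2 : 2 ≤ d.toNat := by omega
        have hDdvd : d.toNat ∣ m.toNat := by
          rcases hdvd with ⟨c, hc⟩
          refine ⟨c.toNat, ?_⟩
          have hc1 : 1 ≤ c := by nlinarith
          have : ((m.toNat : Nat) : Int) = ((d.toNat * c.toNat : Nat) : Int) := by
            push_cast [hdtn, Int.toNat_of_nonneg (by omega : (0:Int) ≤ m),
              Int.toNat_of_nonneg (by omega : (0:Int) ≤ c)]
            exact hc
          exact_mod_cast this
        have hDp : (d.toNat).Prime := by
          have hq := Nat.minFac_prime (n := d.toNat) (by omega)
          have h1' := hfm _ hq ((Nat.minFac_dvd d.toNat).trans hDdvd)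
          have h2 : d.toNat.minFac ≤ d.toNat := Nat.minFac_le (by omega)
          have heqm : d.toNat.minFac = d.toNat := by omega
          rw [← heqm]; exact hq
        have ht'n : ((t'.toNat : Nat) : Int) = t' := Int.toNat_of_nonneg (by omega)
        have hsplitN : m.toNat = d.toNat ^ k * t'.toNat := by
          have h2 : ((m.toNat : Nat) : Int) = ((d.toNat ^ k * t'.toNat : Nat) : Int) := by
            rw [Int.toNat_of_nonneg (by omega : (0:Int) ≤ m), hsplit]
            push_cast [hdtn, ht'n]; ring
          exact_mod_cast h2
        have hndN : ¬ d.toNat ∣ t'.toNat := by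
          intro h
          exact hnd (by rw [← ht'n, ← hdtn]; exact_mod_cast h)
        have hk1 : 1 ≤ k := by
          rcases Nat.eq_zero_or_pos k with h0k | h
          · exfalso
            rw [h0k, pow_zero, one_mul] at hsplitN
            exact hndN (hsplitN ▸ hDdvd)
          · exact h
        have coC : Nat.Coprime C (d.toNat ^ k) := by
          by_contra hnc
          obtain ⟨r, hr, hrC, hrD⟩ := Nat.Prime.not_coprime_iff_dvd.mp hnc
          have hrd : r = d.toNat :=
            (Nat.prime_dvd_prime_iff_eq hr hDp).mp (hr.dvd_of_dvd_pow hrD)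
          have := hfC r hr hrC
          rw [hrd, hdtn] at this
          omega
        have hspp : sPrimePow d ((k : Nat) : Int) = (Lk (d.toNat ^ k) : Int) := by
          have h := sPrimePow_spec (a := ((k : Nat) : Int)) hd hDp (by exact_mod_cast hk1)
          rwa [Int.toNat_natCast] at h
        have ht'm : t' ≤ m := by
          have hdk : (1 : Int) ≤ d ^ k := one_le_pow₀ (by omega)
          nlinarith [hsplit]
        have hrec := ih (d+1) t' (max result (sPrimePow d ((k : Nat) : Int)))
          (C * d.toNat ^ k) (by omega) h1 (Nat.one_le_iff_ne_zero.mpr (by positivity)) ?_ ?_ ?_ (by omega)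
        · rw [hrec, hsplitN, ← mul_assoc]
        · intro q hq hqt'
          have hqm : q ∣ m.toNat := hsplitN ▸ Dvd.dvd.mul_left hqt' _
          have h1' := hfm q hq hqm
          have hqne : q ≠ d.toNat := by
            rintro rfl
            exact hndN hqt'
          have : ((q : Nat) : Int) ≠ d := by
            rw [← hdtn]
            exact_mod_cast hqne
          omega
        · intro q hq hqC
          rcases (Nat.Prime.dvd_mul hq).mp hqC with h | h
          · exact lt_trans (hfC q hq h) (by omega)
          · have : q = d.toNat :=
              (Nat.prime_dvd_prime_iff_eq hq hDp).mp (hq.dvd_of_dvd_pow h)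
            rw [this, hdtn]
            omega
        · rw [hres, hspp,
            Lk_mul hC (Nat.one_le_iff_ne_zero.mpr (by positivity)) coC, Nat.cast_max]
      · rw [if_neg (by rw [PySem.Int.mod_eq_zero_iff_dvd]; exact hdvd)]
        have hrec := ih (d+1) m result C (by omega) hm hC ?_
          (fun q hq hqC => lt_trans (hfC q hq hqC) (by omega)) hres (by omega)
        · rw [hrec]
        · intro q hq hqm
          have h1' := hfm q hq hqm
          have hdtn : ((d.toNat : Nat) : Int) = d := Int.toNat_of_nonneg (by omega)
          have hqne : ((q : Nat) : Int) ≠ d := by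
            intro hqd
            apply hdvd
            have hqdN : q = d.toNat := by omega
            have hdd : d.toNat ∣ m.toNat := hqdN ▸ hqm
            rcases hdd with ⟨c, hc⟩
            refine ⟨(c : Int), ?_⟩
            rw [← Int.toNat_of_nonneg (by omega : (0:Int) ≤ m), hc]
            push_cast [hdtn]
            ring
          omega
    · rw [if_neg hcond]
      by_cases hm1 : 1 < m
      · rw [if_pos hm1]
        have hm2n : 2 ≤ m.toNat := by omega
        have hmtn : ((m.toNat : Nat) : Int) = m := Int.toNat_of_nonneg (by omega)
        have hMp : m.toNat.Prime := by
          by_contra hnp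
          have hsq := Nat.minFac_sq_le_self (n := m.toNat) (by omega) hnp
          have hq := Nat.minFac_prime (n := m.toNat) (by omega)
          have h1' := hfm _ hq (Nat.minFac_dvd _)
          apply hcond
          have hcast : ((m.toNat.minFac ^ 2 : Nat) : Int) ≤ ((m.toNat : Nat) : Int) := by
            exact_mod_cast hsq
          rw [hmtn] at hcast
          push_cast at hcast
          nlinarith
        have hspp : sPrimePow m 1 = (Lk (m.toNat ^ ((1:Int)).toNat) : Int) :=
          sPrimePow_spec (by omega) hMp le_rfl
        norm_num at hspp
        have coM : Nat.Coprime C m.toNat := by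
          by_contra hnc
          obtain ⟨r, hr, hrC, hrM⟩ := Nat.Prime.not_coprime_iff_dvd.mp hnc
          have := hfC r hr hrC
          have := hfm r hr hrM
          omega
        rw [hres, hspp, Lk_mul hC (by omega) coM, Nat.cast_max]
      · rw [if_neg hm1]
        have hm'' : m = 1 := by omega
        subst hm''
        simpa using hres

lemma kempner_alt_pos {n : Int} (hn : 1 ≤ n) : kempner_alt n = (Lk n.toNat : Int) := by
  unfold kempner_alt
  have h := factorLoop_spec (n.natAbs + 2) 2 n 1 1 le_rfl hn le_rfl
    (fun q hq _ => by exact_mod_cast hq.two_le)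
    (fun q hq hq1 => absurd (Nat.dvd_one.mp hq1) hq.ne_one)
    (by simp [Lk_one]) (by omega)
  rw [h, one_mul]

lemma kempner_alt_neg {n : Int} (hn : n ≤ -1) : kempner_alt n = 1 := by
  show factorLoop (n.natAbs + 1 + 1) 2 n 1 = 1
  rw [factorLoop, if_neg (by omega), if_neg (by omega)]

lemma mod_fact_pos_iff {n v : Int} (hn : 1 ≤ n) :
    (0 < PySem.Int.mod (pyFactorial v) n) ↔ ¬ (n ∣ pyFactorial v) := by
  have h0 := PySem.Int.mod_nonneg (a := pyFactorial v) (b := n) (by omega)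
  have h1 := PySem.Int.mod_eq_zero_iff_dvd (pyFactorial v) n
  constructor
  · intro h hd
    have := h1.mpr hd
    omega
  · intro h
    have : PySem.Int.mod (pyFactorial v) n ≠ 0 := fun he => h (h1.mp he)
    omega

lemma int_dvd_fact_iff {n : Int} (hn : 1 ≤ n) (v : Nat) :
    n ∣ pyFactorial (v : Int) ↔ n.toNat ∣ Nat.factorial v := by
  have hpf : pyFactorial (v : Int) = ((Nat.factorial v : Nat) : Int) := by
    simp [pyFactorial]
  have hntn : ((n.toNat : Nat) : Int) = n := Int.toNat_of_nonneg (by omega)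
  have h2 := Int.natCast_dvd_natCast (m := n.toNat) (n := Nat.factorial v)
  rw [hntn] at h2
  rw [hpf]
  exact h2

lemma int_neg_dvd_fact_iff (n : Int) (v : Nat) :
    n ∣ pyFactorial (v : Int) ↔ n.natAbs ∣ Nat.factorial v := by
  have hpf : pyFactorial (v : Int) = ((Nat.factorial v : Nat) : Int) := by
    simp [pyFactorial]
  rw [hpf, ← Int.natAbs_dvd, Int.natCast_dvd_natCast]

lemma loopA_pos {n : Int} (hn : 2 ≤ n) :
    ∀ (fuel : Nat) (v : Nat), 1 ≤ v → v < Lk n.toNat → Lk n.toNat ≤ v + fuel →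
      kempnerLoop n fuel (v : Int) ((v : Int) - 1) = (Lk n.toNat : Int) := by
  have hN : 1 ≤ n.toNat := by omega
  intro fuel
  induction fuel with
  | zero => intro v hv1 hvM hle; omega
  | succ fuel ih =>
    intro v hv1 hvM hle
    rw [kempnerLoop]
    have hnd : ¬ n ∣ pyFactorial (v : Int) := by
      rw [int_dvd_fact_iff (by omega)]
      exact Lk_not_dvd hN hv1 hvM
    rw [if_pos ((mod_fact_pos_iff (by omega)).mpr hnd)]
    have hcast : ((v : Int) + 1) = (((v + 1 : Nat) : Nat) : Int) := by push_cast; ring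
    rcases Nat.lt_or_ge (v + 1) (Lk n.toNat) with hlt | hge
    · have hnd2 : ¬ PySem.Int.mod (pyFactorial ((v : Int) + 1)) n = 0 := by
        rw [hcast, PySem.Int.mod_eq_zero_iff_dvd, int_dvd_fact_iff (by omega)]
        exact Lk_not_dvd hN (by omega) hlt
      rw [if_neg hnd2]
      have h := ih (v + 1) (by omega) hlt (by omega)
      have e1 : (((v + 1 : Nat) : Nat) : Int) = (v : Int) + 1 := by push_cast; ring
      rw [e1] at h
      have e2 : (v : Int) + 1 - 1 = (v : Int) - 1 + 1 := by ring
      rw [e2] at h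
      exact h
    · have hM : v + 1 = Lk n.toNat := by omega
      have hd2 : PySem.Int.mod (pyFactorial ((v : Int) + 1)) n = 0 := by
        rw [hcast, PySem.Int.mod_eq_zero_iff_dvd, int_dvd_fact_iff (by omega), hM]
        exact Lk_dvd hN
      rw [if_pos hd2]
      have : ((Lk n.toNat : Nat) : Int) = ((v + 1 : Nat) : Int) := by rw [hM]
      rw [this]
      push_cast
      ring

lemma loopA_neg {n : Int} (hn : n ≤ -1) :
    ∀ (fuel : Nat) (v : Nat), 1 ≤ v → v < max 2 (Lk n.natAbs) →
      max 2 (Lk n.natAbs) ≤ v + fuel →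
      kempnerLoop n fuel (v : Int) 0 = 1 := by
  have hN : 1 ≤ n.natAbs := by omega
  have hnotdvd : ∀ y : Nat, 2 ≤ y → y < max 2 (Lk n.natAbs) → ¬ n.natAbs ∣ Nat.factorial y := by
    intro y hy2 hylt
    have : y < Lk n.natAbs := by omega
    exact Lk_not_dvd hN (by omega) this
  have hdvdM : n.natAbs ∣ Nat.factorial (max 2 (Lk n.natAbs)) :=
    (Lk_dvd hN).trans (Nat.factorial_dvd_factorial (le_max_right _ _))
  intro fuel
  induction fuel with
  | zero => intro v hv1 hvM hle; omega
  | succ fuel ih =>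
    intro v hv1 hvM hle
    rw [kempnerLoop]
    have hmneg : PySem.Int.mod (pyFactorial (v : Int)) n ≤ 0 :=
      (PySem.Int.mod_neg_bounds (a := pyFactorial (v : Int)) (b := n) (by omega)).2
    have hinner : (if 0 < PySem.Int.mod (pyFactorial (v : Int)) n then (0:Int) + 1 else 0) = 0 := by
      rw [if_neg (by omega)]
    have hcast : ((v : Int) + 1) = (((v + 1 : Nat) : Nat) : Int) := by push_cast; ring
    rcases Nat.lt_or_ge (v + 1) (max 2 (Lk n.natAbs)) with hlt | hge
    · have hnd2 : ¬ PySem.Int.mod (pyFactorial ((v : Int) + 1)) n = 0 := by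
        rw [hcast, PySem.Int.mod_eq_zero_iff_dvd, int_neg_dvd_fact_iff]
        exact hnotdvd (v + 1) (by omega) hlt
      rw [if_neg hnd2, hinner]
      have h := ih (v + 1) (by omega) hlt (by omega)
      have e1 : (((v + 1 : Nat) : Nat) : Int) = (v : Int) + 1 := by push_cast; ring
      rw [e1] at h
      exact h
    · have hM : v + 1 = max 2 (Lk n.natAbs) := by omega
      have hd2 : PySem.Int.mod (pyFactorial ((v : Int) + 1)) n = 0 := by
        rw [hcast, PySem.Int.mod_eq_zero_iff_dvd, int_neg_dvd_fact_iff, hM]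
        exact hdvdM
      rw [if_pos hd2, hinner]
      norm_num

lemma dom_abs_le {n : Int} (hd : Dom_kempner n) : n.natAbs ≤ 2147483648 := by
  have : -2147483648 ≤ n ∧ n ≤ 2147483648 := by
    simpa [Dom_kempner, pvDomInt] using hd
  omega

lemma kempner_pos {n : Int} (hd : Dom_kempner n) (hn : 2 ≤ n) :
    kempner n = (Lk n.toNat : Int) := by
  have habs := dom_abs_le hd
  have hLk : Lk n.toNat ≤ n.toNat := Lk_le_self (by omega)
  have h2 : 2 ≤ Lk n.toNat := Lk_ge_two (by omega)
  have h := loopA_pos hn 4294967296 1 le_rfl (by omega) (by omega)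
  norm_num at h
  unfold kempner
  exact h

lemma kempner_one : kempner 1 = 1 := by
  show kempnerLoop 1 (4294967295 + 1) 1 0 = 1
  rw [kempnerLoop]
  have hz : ∀ x : Int, PySem.Int.mod x 1 = 0 := fun x =>
    (PySem.Int.mod_eq_zero_iff_dvd x 1).mpr (one_dvd x)
  rw [if_pos (hz (pyFactorial (1 + 1))), hz (pyFactorial 1)]
  norm_num

lemma kempner_neg {n : Int} (hd : Dom_kempner n) (hn : n ≤ -1) : kempner n = 1 := by
  have habs := dom_abs_le hd
  have hLk : Lk n.natAbs ≤ n.natAbs := Lk_le_self (by omega)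
  have h := loopA_neg hn 4294967296 1 le_rfl (by omega) (by omega)
  norm_num at h
  unfold kempner
  exact h

-- ===== VERDICT (by name: the statement is the Claim_ definition above) =====
theorem kempner_spec : Claim_equal_kempner := by
  intro n hdom hpre
  unfold Spec_kempner
  rcases lt_trichotomy n 0 with hneg | hzero | hposp
  · rw [kempner_neg hdom (by omega), kempner_alt_neg (by omega)]
  · exact absurd hzero hpre
  · by_cases h1 : n = 1
    · subst h1
      rw [kempner_one, kempner_alt_pos le_rfl]
      norm_num [Lk_one]
    · rw [kempner_pos hdom (by omega), kempner_alt_pos (by omega)]
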